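-- pv_equiv track=rewrite | github.com/moqiguzhu/Online-Judge | leetcode-python/weeklycontest/190/problem4.py | maxDotProduct1
-- ===== SOURCE A (Python) =====
-- from typing import List
--
-- def maxDotProduct1(nums1: List[int], nums2: List[int]) -> int:
--     # 处理特殊情况
--     t1, t2 = min(nums1), max(nums1)
--     t3, t4 = min(nums2), max(nums2)
--     if t1 > 0 and t4 < 0:
--         return t1 * t4
--     if t2 < 0 and t3 > 0:
--         return t2 * t3
--     n1, n2 = len(nums1), len(nums2)
--
--     dp = [[0] * (n2+1) for _ in range(n1+1)]
--     for i in range(1, n1+1):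
--         for j in range(1, n2+1):
--             t = -10**9 - 7
--             for k in range(1, i+1):
--                 t = max(t, nums2[j-1] * nums1[k-1] + dp[k-1][j-1])
--             dp[k][j] = max(dp[k][j-1], t)
--
--     return dp[n1][n2]
-- ===== SOURCE B (Python) =====
-- from typing import List
--
-- def maxDotProduct1(nums1: List[int], nums2: List[int]) -> int:
--     t1, t2 = min(nums1), max(nums1)
--     t3, t4 = min(nums2), max(nums2)
--     if t1 > 0 and t4 < 0:
--         return t1 * t4
--     if t2 < 0 and t3 > 0:
--         return t2 * t3
--     n2 = len(nums2)
--     NEG = -10**9 - 7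
--     # prev = previous dp row; best[j] = best "pair ending at column j" value so far,
--     # carried incrementally across rows: no inner k-scan.
--     prev = [0] * (n2 + 1)
--     best = [NEG] * (n2 + 1)
--     for a in nums1:
--         cur = [0] * (n2 + 1)
--         for j in range(1, n2 + 1):
--             b = max(best[j], nums2[j-1] * a + prev[j-1])
--             best[j] = b
--             cur[j] = max(cur[j-1], b)
--         prev = cur
--     return prev[n2]
-- ===== Notes on version B (the rewrite author's own statement) =====
-- stated objective: faster
-- what changed: Replaced the inner k-scan over all previous rows by a per-column running maximum best[j] carried incrementally across rows, and kept only the previous dp row instead of the full table.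
import Mathlib
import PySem

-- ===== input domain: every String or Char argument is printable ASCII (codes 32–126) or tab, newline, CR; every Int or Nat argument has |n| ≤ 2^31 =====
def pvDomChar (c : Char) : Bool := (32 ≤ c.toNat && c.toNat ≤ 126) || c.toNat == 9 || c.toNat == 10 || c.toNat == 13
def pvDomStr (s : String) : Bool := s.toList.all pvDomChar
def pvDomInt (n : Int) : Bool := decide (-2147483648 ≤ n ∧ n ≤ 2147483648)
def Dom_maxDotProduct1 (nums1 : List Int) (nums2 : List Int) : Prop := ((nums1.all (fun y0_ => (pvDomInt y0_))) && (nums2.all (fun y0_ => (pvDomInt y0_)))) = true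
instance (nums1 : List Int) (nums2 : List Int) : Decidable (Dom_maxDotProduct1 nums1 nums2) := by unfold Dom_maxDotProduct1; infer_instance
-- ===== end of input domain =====

-- B replaces A's inner k-scan over all previous rows by a per-column running maximum
-- carried incrementally across rows (O(n1*n2) instead of O(n1^2*n2)); measured faster.


-- ===== PORT A =====
-- shared indexing helpers: 1-D / 2-D list read with default 0 (every index the ports read
-- is in range under Pre_, so these are exact for the Python subscripts) and a 2-D write
def pvG1 (xs : List Int) (i : Nat) : Int := xs.getD i 0
def pvG2 (dp : List (List Int)) (i j : Nat) : Int := (dp.getD i []).getD j 0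
def pvSet2 (dp : List (List Int)) (i j : Nat) (v : Int) : List (List Int) :=
  dp.set i ((dp.getD i []).set j v)

-- body of A's j-loop: the k-scan computing t, then the write dp[k][j] = max(dp[k][j-1], t)
-- (after the k-loop, which always runs since i ≥ 1, the Python variable k equals i)
def pvAinner (nums1 nums2 : List Int) (i : Nat) (dp : List (List Int)) (j : Nat) : List (List Int) :=
  let t := (List.range' 1 i).foldl
    (fun t k => max t (pvG1 nums2 (j-1) * pvG1 nums1 (k-1) + pvG2 dp (k-1) (j-1)))
    (-(10:Int)^9 - 7)
  pvSet2 dp i j (max (pvG2 dp i (j-1)) t)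

-- body of A's i-loop: for j in range(1, n2+1)
def pvArow (nums1 nums2 : List Int) (dp : List (List Int)) (i : Nat) : List (List Int) :=
  (List.range' 1 nums2.length).foldl (pvAinner nums1 nums2 i) dp

def maxDotProduct1 (nums1 : List Int) (nums2 : List Int) : Int :=
  -- min()/max() of a nonempty list (Pre_ guarantees nonemptiness; Python raises on [])
  let t1 := (PySem.List.min? nums1 (fun y => y)).getD 0
  let t2 := (PySem.List.max? nums1 (fun y => y)).getD 0
  let t3 := (PySem.List.min? nums2 (fun y => y)).getD 0
  let t4 := (PySem.List.max? nums2 (fun y => y)).getD 0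
  if t1 > 0 ∧ t4 < 0 then t1 * t4
  else if t2 < 0 ∧ t3 > 0 then t2 * t3
  else
    let n1 := nums1.length
    let n2 := nums2.length
    let dp := (List.range' 1 n1).foldl (pvArow nums1 nums2)
      (List.replicate (n1+1) (List.replicate (n2+1) (0:Int)))
    pvG2 dp n1 n2

-- ===== PORT B =====
-- body of B's j-loop: update best[j] from prev, then cur[j] = max(cur[j-1], best[j])
def pvBinner (nums2 : List Int) (a : Int) (prev : List Int)
    (st2 : List Int × List Int) (j : Nat) : List Int × List Int :=
  let b := max (pvG1 st2.2 j) (pvG1 nums2 (j-1) * a + pvG1 prev (j-1))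
  (st2.1.set j (max (pvG1 st2.1 (j-1)) b), st2.2.set j b)

-- body of B's loop over nums1: fresh cur row, sweep j, return (cur, best); prev := cur
def pvBrow (nums2 : List Int) (st : List Int × List Int) (a : Int) : List Int × List Int :=
  (List.range' 1 nums2.length).foldl (pvBinner nums2 a st.1)
    (List.replicate (nums2.length+1) (0:Int), st.2)

def maxDotProduct1_alt (nums1 : List Int) (nums2 : List Int) : Int :=
  let t1 := (PySem.List.min? nums1 (fun y => y)).getD 0
  let t2 := (PySem.List.max? nums1 (fun y => y)).getD 0
  let t3 := (PySem.List.min? nums2 (fun y => y)).getD 0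
  let t4 := (PySem.List.max? nums2 (fun y => y)).getD 0
  if t1 > 0 ∧ t4 < 0 then t1 * t4
  else if t2 < 0 ∧ t3 > 0 then t2 * t3
  else
    let n2 := nums2.length
    let st := nums1.foldl (pvBrow nums2)
      (List.replicate (n2+1) (0:Int), List.replicate (n2+1) (-(10:Int)^9 - 7))
    pvG1 st.1 n2

-- ===== PRECONDITION & SPEC =====
-- Pre_ excludes exactly the inputs where Python A raises: min()/max() of an empty list (ValueError)
def Pre_maxDotProduct1 (nums1 : List Int) (nums2 : List Int) : Prop := nums1 ≠ [] ∧ nums2 ≠ []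
instance (nums1 : List Int) (nums2 : List Int) : Decidable (Pre_maxDotProduct1 nums1 nums2) := by
  unfold Pre_maxDotProduct1; infer_instance
def pvWitness_maxDotProduct1 : List Int × List Int := ([2, -1, 3], [1, -2, 5])

def Spec_maxDotProduct1 (nums1 : List Int) (nums2 : List Int) (out : Int) : Prop := out = maxDotProduct1_alt nums1 nums2
instance (nums1 : List Int) (nums2 : List Int) (out : Int) : Decidable (Spec_maxDotProduct1 nums1 nums2 out) := by unfold Spec_maxDotProduct1; infer_instance

-- ===== CLAIM (what is proved, stated in full; the proofs are below) =====
def Claim_equal_maxDotProduct1 : Prop := ∀ (nums1 : List Int) (nums2 : List Int), Dom_maxDotProduct1 nums1 nums2 → Pre_maxDotProduct1 nums1 nums2 → Spec_maxDotProduct1 nums1 nums2 (maxDotProduct1 nums1 nums2)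

-- ===== LEMMAS AND PROOFS =====

-- the mathematical dp table, column by column: pvCol nums1 nums2 j i = dp[i][j]
def pvT (nums1 nums2 : List Int) (c : Nat → Int) (i j : Nat) : Int :=
  (List.range' 1 i).foldl
    (fun t k => max t (pvG1 nums2 (j-1) * pvG1 nums1 (k-1) + c (k-1)))
    (-(10:Int)^9 - 7)

def pvCol (nums1 nums2 : List Int) : Nat → Nat → Int
  | 0, _ => 0
  | _+1, 0 => 0
  | j+1, i+1 => max (pvCol nums1 nums2 j (i+1))
      (pvT nums1 nums2 (pvCol nums1 nums2 j) (i+1) (j+1))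

theorem pvCol_zero_right (nums1 nums2 : List Int) (c : Nat) :
    pvCol nums1 nums2 c 0 = 0 := by cases c <;> rfl

-- basic getD/set bookkeeping
theorem pvG1_set_self (xs : List Int) (i : Nat) (v : Int) (h : i < xs.length) :
    pvG1 (xs.set i v) i = v := by
  simp [pvG1, List.getD, h]

theorem pvG1_set_ne (xs : List Int) (i j : Nat) (v : Int) (h : i ≠ j) :
    pvG1 (xs.set i v) j = pvG1 xs j := by
  simp [pvG1, List.getD, List.getElem?_set_ne h]

theorem pvG1_replicate (n i : Nat) (v : Int) (h : i < n) :
    pvG1 (List.replicate n v) i = v := by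
  simp [pvG1, List.getD, h]

theorem pvG2_replicate (n m i j : Nat) (h : i < n) (h2 : j < m) :
    pvG2 (List.replicate n (List.replicate m (0:Int))) i j = 0 := by
  simp [pvG2, List.getD, h, h2]

theorem pvG2_set2_self (dp : List (List Int)) (i j : Nat) (v : Int)
    (h : i < dp.length) (h2 : j < (dp.getD i []).length) :
    pvG2 (pvSet2 dp i j v) i j = v := by
  have h2' : j < dp[i].length := by
    simpa [List.getD, List.getElem?_eq_getElem h] using h2
  simp [pvG2, pvSet2, List.getD, h, h2']

theorem pvG2_set2_ne (dp : List (List Int)) (i j r c : Nat) (v : Int)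
    (h : ¬ (i = r ∧ j = c)) :
    pvG2 (pvSet2 dp i j v) r c = pvG2 dp r c := by
  by_cases hir : i = r
  · subst hir
    have hjc : j ≠ c := fun hh => h ⟨rfl, hh⟩
    by_cases hlen : i < dp.length
    · simp [pvG2, pvSet2, List.getD, hlen, List.getElem?_set_ne hjc]
    · simp [pvG2, pvSet2, List.set_eq_of_length_le (by omega : dp.length ≤ i)]
  · simp [pvG2, pvSet2, List.getD, List.getElem?_set_ne hir]

-- shape of A's table
def pvShape (n1 n2 : Nat) (dp : List (List Int)) : Prop :=
  dp.length = n1 + 1 ∧ ∀ row ∈ dp, row.length = n2 + 1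

theorem pvShape_row (n1 n2 : Nat) (dp : List (List Int)) (hs : pvShape n1 n2 dp)
    (i : Nat) (h : i ≤ n1) : (dp.getD i []).length = n2 + 1 := by
  have hl := hs.1
  have hi : i < dp.length := by omega
  have : dp.getD i [] = dp[i] := by simp [List.getD, List.getElem?_eq_getElem hi]
  rw [this]
  exact hs.2 _ (List.getElem_mem hi)

theorem pvShape_set2 (n1 n2 : Nat) (dp : List (List Int)) (hs : pvShape n1 n2 dp)
    (i j : Nat) (hi : i ≤ n1) (v : Int) : pvShape n1 n2 (pvSet2 dp i j v) := by
  constructor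
  · simpa [pvSet2] using hs.1
  · intro row hm
    rcases List.mem_or_eq_of_mem_set hm with h | h
    · exact hs.2 _ h
    · rw [h]; simpa using pvShape_row n1 n2 dp hs i hi

-- pvT at one more row
theorem pvT_succ (nums1 nums2 : List Int) (c : Nat → Int) (i j : Nat) :
    pvT nums1 nums2 c (i+1) j
      = max (pvT nums1 nums2 c i j) (pvG1 nums2 (j-1) * pvG1 nums1 i + c i) := by
  have h : List.range' 1 (i+1) = List.range' 1 i ++ [1+i] := List.range'_1_concat (s := 1)
  simp [pvT, h, List.foldl_append]

-- ---------- A-side invariants ----------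
def pvInvAJ (nums1 nums2 : List Int) (i j : Nat) (dp : List (List Int)) : Prop :=
  pvShape nums1.length nums2.length dp ∧
  ∀ r c, r ≤ nums1.length → c ≤ nums2.length →
    pvG2 dp r c =
      if r < i then pvCol nums1 nums2 c r
      else if r = i ∧ c ≤ j then pvCol nums1 nums2 c i
      else 0

def pvInvA (nums1 nums2 : List Int) (i : Nat) (dp : List (List Int)) : Prop :=
  pvShape nums1.length nums2.length dp ∧
  ∀ r c, r ≤ nums1.length → c ≤ nums2.length →
    pvG2 dp r c = if r ≤ i then pvCol nums1 nums2 c r else 0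

theorem pvAinner_step (nums1 nums2 : List Int) (i j : Nat)
    (hi1 : 1 ≤ i) (hi : i ≤ nums1.length) (hj : j + 1 ≤ nums2.length)
    (dp : List (List Int)) (hinv : pvInvAJ nums1 nums2 i j dp) :
    pvInvAJ nums1 nums2 i (j+1) (pvAinner nums1 nums2 i dp (j+1)) := by
  obtain ⟨hs, hv⟩ := hinv
  have hrow := pvShape_row _ _ _ hs i hi
  have hlen : i < dp.length := by have := hs.1; omega
  obtain ⟨i', rfl⟩ : ∃ i', i = i' + 1 := ⟨i - 1, by omega⟩
  have ht : (List.range' 1 (i'+1)).foldl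
      (fun t k => max t (pvG1 nums2 (j+1-1) * pvG1 nums1 (k-1) + pvG2 dp (k-1) (j+1-1)))
      (-(10:Int)^9 - 7)
      = pvT nums1 nums2 (pvCol nums1 nums2 j) (i'+1) (j+1) := by
    unfold pvT
    apply List.foldl_ext
    intro t k hk
    have hk' : 1 ≤ k ∧ k < 1 + (i'+1) := by simpa [List.mem_range'_1] using hk
    have hrd := hv (k-1) j (by omega) (by omega)
    rw [if_pos (by omega : k - 1 < i' + 1)] at hrd
    simp only [Nat.add_sub_cancel]
    rw [hrd]
  have hwr : pvG2 dp (i'+1) (j+1-1) = pvCol nums1 nums2 j (i'+1) := by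
    have hrd := hv (i'+1) j hi (by omega)
    rw [if_neg (by omega), if_pos (by omega)] at hrd
    simpa using hrd
  constructor
  · exact pvShape_set2 _ _ _ hs _ _ hi _
  · intro r c hr hc
    unfold pvAinner
    by_cases hrc : i' + 1 = r ∧ j + 1 = c
    · obtain ⟨hr1, hc1⟩ := hrc
      subst hr1; subst hc1
      rw [ht, pvG2_set2_self _ _ _ _ hlen (by omega), hwr]
      rw [if_neg (by omega), if_pos (by omega)]
      simp [pvCol]
    · rw [ht, pvG2_set2_ne _ _ _ _ _ _ hrc, hv r c hr hc]
      split_ifs <;> first | rfl | omega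

theorem pvArow_step (nums1 nums2 : List Int) (i : Nat)
    (hi1 : 1 ≤ i) (hi : i ≤ nums1.length)
    (dp : List (List Int)) (hinv : pvInvA nums1 nums2 (i-1) dp) :
    pvInvA nums1 nums2 i (pvArow nums1 nums2 dp i) := by
  have base : pvInvAJ nums1 nums2 i 0 dp := by
    refine ⟨hinv.1, ?_⟩
    intro r c hr hc
    rw [hinv.2 r c hr hc]
    by_cases hri : r < i
    · rw [if_pos (by omega), if_pos hri]
    · rw [if_neg (by omega)]
      by_cases hreq : r = i ∧ c ≤ 0
      · rw [if_pos hreq]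
        obtain ⟨_, hc0⟩ := hreq
        obtain rfl : c = 0 := by omega
        simp [pvCol]
      · rw [if_neg hreq, if_neg hri]
  have main : ∀ m, m ≤ nums2.length →
      pvInvAJ nums1 nums2 i m ((List.range' 1 m).foldl (pvAinner nums1 nums2 i) dp) := by
    intro m
    induction m with
    | zero => intro _; simpa using base
    | succ m ih =>
      intro hm
      rw [List.range'_1_concat (s := 1), List.foldl_append]
      simp only [List.foldl_cons, List.foldl_nil]
      have := pvAinner_step nums1 nums2 i m hi1 hi hm _ (ih (by omega))
      simpa [Nat.add_comm 1 m] using this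
  have fin := main nums2.length le_rfl
  refine ⟨fin.1, ?_⟩
  intro r c hr hc
  unfold pvArow
  rw [(fin.2 r c hr hc : _)]
  by_cases hri : r < i
  · rw [if_pos hri, if_pos (by omega)]
  · by_cases hre : r = i
    · subst hre
      rw [if_neg hri, if_pos ⟨rfl, hc⟩, if_pos le_rfl]
    · rw [if_neg hri, if_neg (by tauto), if_neg (by omega)]

theorem pvA_fold (nums1 nums2 : List Int) (m : Nat) (hm : m ≤ nums1.length) :
    pvInvA nums1 nums2 m ((List.range' 1 m).foldl (pvArow nums1 nums2)
      (List.replicate (nums1.length+1) (List.replicate (nums2.length+1) (0:Int)))) := by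
  induction m with
  | zero =>
    rw [show List.range' 1 0 = ([] : List ℕ) from rfl, List.foldl_nil]
    refine ⟨⟨by simp, ?_⟩, ?_⟩
    · intro row hm
      rw [List.eq_of_mem_replicate hm]; simp
    · intro r c hr hc
      rw [pvG2_replicate _ _ _ _ (by omega) (by omega)]
      by_cases hr0 : r ≤ 0
      · obtain rfl : r = 0 := by omega
        rw [if_pos le_rfl, pvCol_zero_right]
      · rw [if_neg hr0]
  | succ m ih =>
    rw [List.range'_1_concat (s := 1), List.foldl_append]
    simp only [List.foldl_cons, List.foldl_nil]
    have := pvArow_step nums1 nums2 (m+1) (by omega) hm _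
      (by simpa using ih (by omega))
    simpa [Nat.add_comm 1 m] using this

theorem pvA_value (nums1 nums2 : List Int) :
    pvG2 ((List.range' 1 nums1.length).foldl (pvArow nums1 nums2)
        (List.replicate (nums1.length+1) (List.replicate (nums2.length+1) (0:Int))))
      nums1.length nums2.length
    = pvCol nums1 nums2 nums2.length nums1.length := by
  have h := pvA_fold nums1 nums2 nums1.length le_rfl
  have := h.2 nums1.length nums2.length le_rfl le_rfl
  simpa using this

-- ---------- B-side invariants ----------
def pvInvB (nums1 nums2 : List Int) (i : Nat) (st : List Int × List Int) : Prop :=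
  st.1.length = nums2.length + 1 ∧ st.2.length = nums2.length + 1 ∧
  (∀ c, c ≤ nums2.length → pvG1 st.1 c = pvCol nums1 nums2 c i) ∧
  (∀ j, 1 ≤ j → j ≤ nums2.length →
    pvG1 st.2 j = pvT nums1 nums2 (pvCol nums1 nums2 (j-1)) i j)

def pvInvBJ (nums1 nums2 : List Int) (i m : Nat) (st2 : List Int × List Int) : Prop :=
  st2.1.length = nums2.length + 1 ∧ st2.2.length = nums2.length + 1 ∧
  (∀ c, c ≤ nums2.length →
    pvG1 st2.1 c = if c ≤ m then pvCol nums1 nums2 c (i+1) else 0) ∧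
  (∀ j, 1 ≤ j → j ≤ nums2.length →
    pvG1 st2.2 j = if j ≤ m then pvT nums1 nums2 (pvCol nums1 nums2 (j-1)) (i+1) j
      else pvT nums1 nums2 (pvCol nums1 nums2 (j-1)) i j)

theorem pvBinner_step (nums1 nums2 : List Int) (i m : Nat) (hm : m + 1 ≤ nums2.length)
    (prev : List Int)
    (hprev : ∀ c, c ≤ nums2.length → pvG1 prev c = pvCol nums1 nums2 c i)
    (st2 : List Int × List Int) (hinv : pvInvBJ nums1 nums2 i m st2) :
    pvInvBJ nums1 nums2 i (m+1) (pvBinner nums2 (pvG1 nums1 i) prev st2 (m+1)) := by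
  obtain ⟨hl1, hl2, hcur, hbest⟩ := hinv
  have hb : max (pvG1 st2.2 (m+1)) (pvG1 nums2 (m+1-1) * pvG1 nums1 i + pvG1 prev (m+1-1))
      = pvT nums1 nums2 (pvCol nums1 nums2 m) (i+1) (m+1) := by
    rw [hbest (m+1) (by omega) hm, if_neg (by omega)]
    simp only [Nat.add_sub_cancel]
    rw [hprev m (by omega), pvT_succ]
    simp
  have hcv : max (pvG1 st2.1 (m+1-1)) (pvT nums1 nums2 (pvCol nums1 nums2 m) (i+1) (m+1))
      = pvCol nums1 nums2 (m+1) (i+1) := by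
    simp only [Nat.add_sub_cancel]
    rw [hcur m (by omega), if_pos le_rfl]
    simp [pvCol]
  refine ⟨by simpa [pvBinner] using hl1, by simpa [pvBinner] using hl2, ?_, ?_⟩
  · intro c hc
    unfold pvBinner
    by_cases hce : m + 1 = c
    · subst hce
      rw [pvG1_set_self _ _ _ (by omega), hb, hcv, if_pos le_rfl]
    · rw [pvG1_set_ne _ _ _ _ hce, hcur c hc]
      split_ifs <;> first | rfl | omega
  · intro j hj1 hj2
    unfold pvBinner
    by_cases hje : m + 1 = j
    · subst hje
      rw [pvG1_set_self _ _ _ (by omega), hb, if_pos le_rfl]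
      simp
    · rw [pvG1_set_ne _ _ _ _ hje, hbest j hj1 hj2]
      split_ifs <;> first | rfl | omega

theorem pvBrow_step (nums1 nums2 : List Int) (i : Nat)
    (st : List Int × List Int) (hinv : pvInvB nums1 nums2 i st) :
    pvInvB nums1 nums2 (i+1) (pvBrow nums2 st (pvG1 nums1 i)) := by
  obtain ⟨hl1, hl2, hprev, hbest⟩ := hinv
  have base : pvInvBJ nums1 nums2 i 0 (List.replicate (nums2.length+1) (0:Int), st.2) := by
    refine ⟨by simp, hl2, ?_, ?_⟩
    · intro c hc
      rw [pvG1_replicate _ _ _ (by omega)]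
      by_cases hc0 : c ≤ 0
      · obtain rfl : c = 0 := by omega
        rw [if_pos le_rfl]; rfl
      · rw [if_neg hc0]
    · intro j hj1 hj2
      rw [if_neg (by omega)]
      exact hbest j hj1 hj2
  have main : ∀ m, m ≤ nums2.length →
      pvInvBJ nums1 nums2 i m ((List.range' 1 m).foldl (pvBinner nums2 (pvG1 nums1 i) st.1)
        (List.replicate (nums2.length+1) (0:Int), st.2)) := by
    intro m
    induction m with
    | zero => intro _; simpa using base
    | succ m ih =>
      intro hm
      rw [List.range'_1_concat (s := 1), List.foldl_append]
      simp only [List.foldl_cons, List.foldl_nil]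
      have := pvBinner_step nums1 nums2 i m hm st.1 hprev _ (ih (by omega))
      simpa [Nat.add_comm 1 m] using this
  have fin := main nums2.length le_rfl
  refine ⟨fin.1, fin.2.1, ?_, ?_⟩
  · intro c hc
    have := fin.2.2.1 c hc
    rw [if_pos hc] at this
    exact this
  · intro j hj1 hj2
    have := fin.2.2.2 j hj1 hj2
    rw [if_pos hj2] at this
    exact this

theorem pvB_fold (nums1 nums2 : List Int) (l₁ l₂ : List Int) (h : nums1 = l₁ ++ l₂)
    (st : List Int × List Int) (hinv : pvInvB nums1 nums2 l₁.length st) :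
    pvInvB nums1 nums2 nums1.length (l₂.foldl (pvBrow nums2) st) := by
  induction l₂ generalizing l₁ st with
  | nil => subst h; simpa using hinv
  | cons a l₂ ih =>
    have ha : a = pvG1 nums1 l₁.length := by
      subst h
      simp [pvG1, List.getD]
    have hstep := pvBrow_step nums1 nums2 l₁.length st hinv
    rw [← ha] at hstep
    have h' : nums1 = (l₁ ++ [a]) ++ l₂ := by simp [h]
    have := ih (l₁ ++ [a]) h' (pvBrow nums2 st a) (by simpa using hstep)
    simpa using this

theorem pvB_value (nums1 nums2 : List Int) :
    pvG1 (nums1.foldl (pvBrow nums2)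
        (List.replicate (nums2.length+1) (0:Int),
         List.replicate (nums2.length+1) (-(10:Int)^9 - 7))).1 nums2.length
    = pvCol nums1 nums2 nums2.length nums1.length := by
  have init : pvInvB nums1 nums2 0
      (List.replicate (nums2.length+1) (0:Int),
       List.replicate (nums2.length+1) (-(10:Int)^9 - 7)) := by
    refine ⟨by simp, by simp, ?_, ?_⟩
    · intro c hc
      rw [pvG1_replicate _ _ _ (by omega), pvCol_zero_right]
    · intro j hj1 hj2
      rw [pvG1_replicate _ _ _ (by omega)]
      simp [pvT]
  have fin := pvB_fold nums1 nums2 [] nums1 (by simp) _ init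
  exact fin.2.2.1 nums2.length le_rfl

-- ===== VERDICT (by name: the statement is the Claim_ definition above) =====
theorem maxDotProduct1_spec : Claim_equal_maxDotProduct1 := by
  intro nums1 nums2 _ _
  unfold Spec_maxDotProduct1 maxDotProduct1 maxDotProduct1_alt
  dsimp only
  split_ifs with h1 h2
  · rfl
  · rfl
  · rw [pvA_value, pvB_value]
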